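-- pv_equiv track=rewrite | github.com/TakaIshikawa/blueprint | src/blueprint/task_account_recovery_readiness.py | _missing_safeguards
-- ===== SOURCE A (Python) =====
-- from typing import Any, Iterable, Literal, Mapping, TypeVar
--
-- AccountRecoveryScenario = Literal[
--     "self_service_reset",
--     "mfa_recovery",
--     "account_lockout",
--     "support_assisted_recovery",
--     "compromised_account",
--     "recovery_audit_logging",
-- ]
--
-- AccountRecoverySafeguard = Literal[
--     "token_expiry",
--     "one_time_use",
--     "enumeration_resistance",
--     "rate_limiting",
--     "abuse_prevention",
--     "support_verification",
--     "telemetry",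
--     "test_coverage",
-- ]
--
-- _SAFEGUARD_ORDER: tuple[AccountRecoverySafeguard, ...] = (
--     "token_expiry",
--     "one_time_use",
--     "enumeration_resistance",
--     "rate_limiting",
--     "abuse_prevention",
--     "support_verification",
--     "telemetry",
--     "test_coverage",
-- )
--
-- def _missing_safeguards(
--     scenarios: tuple[AccountRecoveryScenario, ...],
--     present: tuple[AccountRecoverySafeguard, ...],
-- ) -> tuple[AccountRecoverySafeguard, ...]:
--     scenario_set = set(scenarios)
--     required: set[AccountRecoverySafeguard] = {"telemetry", "test_coverage"}
--     if scenario_set & {"self_service_reset", "mfa_recovery"}: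
--         required.update({"token_expiry", "one_time_use", "enumeration_resistance", "rate_limiting", "abuse_prevention"})
--     if "account_lockout" in scenario_set:
--         required.update({"enumeration_resistance", "rate_limiting", "abuse_prevention", "telemetry"})
--     if scenario_set & {"support_assisted_recovery", "compromised_account"}:
--         required.update({"support_verification", "telemetry", "test_coverage"})
--     if "recovery_audit_logging" in scenario_set:
--         required.add("telemetry")
--     return tuple(safeguard for safeguard in _SAFEGUARD_ORDER if safeguard in required and safeguard not in present)
-- ===== SOURCE B (Python) =====
-- # Inverted view: instead of accumulating a required-safeguard set from the scenarios,
-- # walk the safeguards and include each one whose triggering-scenario set meets the input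
-- # (None = unconditionally required). Same output order: the table lists safeguards in order.
-- _TRIGGERING_SCENARIOS = {
--     "token_expiry": ("self_service_reset", "mfa_recovery"),
--     "one_time_use": ("self_service_reset", "mfa_recovery"),
--     "enumeration_resistance": ("self_service_reset", "mfa_recovery", "account_lockout"),
--     "rate_limiting": ("self_service_reset", "mfa_recovery", "account_lockout"),
--     "abuse_prevention": ("self_service_reset", "mfa_recovery", "account_lockout"),
--     "support_verification": ("support_assisted_recovery", "compromised_account"),
--     "telemetry": None,
--     "test_coverage": None,
-- }
--
-- def _missing_safeguards(scenarios, present):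
--     return tuple(
--         safeguard
--         for safeguard, triggers in _TRIGGERING_SCENARIOS.items()
--         if safeguard not in present
--         and (triggers is None or any(sc in triggers for sc in scenarios))
--     )
-- ===== Notes on version B (the rewrite author's own statement) =====
-- stated objective: alternative
-- what changed: Inverts the data flow: instead of A's accumulating a required-safeguard set from scenario-group branches and then filtering the order tuple, B iterates the safeguards themselves with an inverted safeguard->triggering-scenarios table, emitting each absent safeguard whose trigger set is None (always required) or meets the input scenarios; no required set is ever built.
import Mathlib
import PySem

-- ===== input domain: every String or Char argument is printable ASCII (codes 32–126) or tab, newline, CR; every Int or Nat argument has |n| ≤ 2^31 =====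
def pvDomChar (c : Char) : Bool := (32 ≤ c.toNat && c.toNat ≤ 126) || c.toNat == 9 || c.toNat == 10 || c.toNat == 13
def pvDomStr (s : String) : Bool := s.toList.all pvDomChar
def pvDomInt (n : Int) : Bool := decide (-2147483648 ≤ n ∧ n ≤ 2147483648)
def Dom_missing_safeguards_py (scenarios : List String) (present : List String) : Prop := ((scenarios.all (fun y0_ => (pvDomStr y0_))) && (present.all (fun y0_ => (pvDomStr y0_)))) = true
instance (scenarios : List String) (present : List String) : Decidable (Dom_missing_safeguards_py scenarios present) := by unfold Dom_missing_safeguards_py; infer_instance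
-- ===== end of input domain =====

-- B inverts A's data flow: instead of building a required set from scenario-group branches and
-- filtering the order tuple, it walks the safeguards with an inverted safeguard->triggering-
-- scenarios table (objective: alternative); same return value on every input.

-- ===== PORT A =====
def pvSafeguardOrder : List String :=
  ["token_expiry", "one_time_use", "enumeration_resistance", "rate_limiting",
   "abuse_prevention", "support_verification", "telemetry", "test_coverage"]

-- the 'required' set A builds (its four conditional updates, verbatim)
def pvRequiredA (scenario_set : PySem.Set String) : PySem.Set String :=
  let required : PySem.Set String := PySem.Set.ofList ["telemetry", "test_coverage"]
  -- 'if scenario_set & {…}:' — a Python set is truthy iff nonempty, so the test is 'inter … ≠ []' (exact)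
  let required := if PySem.Set.inter scenario_set ["self_service_reset", "mfa_recovery"] ≠ [] then
      PySem.Set.update required ["token_expiry", "one_time_use", "enumeration_resistance", "rate_limiting", "abuse_prevention"]
    else required
  let required := if PySem.Set.contains scenario_set "account_lockout" then
      PySem.Set.update required ["enumeration_resistance", "rate_limiting", "abuse_prevention", "telemetry"]
    else required
  let required := if PySem.Set.inter scenario_set ["support_assisted_recovery", "compromised_account"] ≠ [] then
      PySem.Set.update required ["support_verification", "telemetry", "test_coverage"]
    else required
  if PySem.Set.contains scenario_set "recovery_audit_logging" then
      PySem.Set.add required "telemetry"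
    else required

def missing_safeguards_py (scenarios : List String) (present : List String) : List String :=
  let required := pvRequiredA (PySem.Set.ofList scenarios)
  pvSafeguardOrder.filter (fun s => PySem.Set.contains required s && !(present.contains s))

-- ===== PORT B =====
-- safeguard -> scenarios that trigger it; none = unconditionally required
def pvTriggeringScenarios : List (String × Option (List String)) :=
  [("token_expiry", some ["self_service_reset", "mfa_recovery"]),
   ("one_time_use", some ["self_service_reset", "mfa_recovery"]),
   ("enumeration_resistance", some ["self_service_reset", "mfa_recovery", "account_lockout"]),
   ("rate_limiting", some ["self_service_reset", "mfa_recovery", "account_lockout"]),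
   ("abuse_prevention", some ["self_service_reset", "mfa_recovery", "account_lockout"]),
   ("support_verification", some ["support_assisted_recovery", "compromised_account"]),
   ("telemetry", none),
   ("test_coverage", none)]

def missing_safeguards_py_alt (scenarios : List String) (present : List String) : List String :=
  (pvTriggeringScenarios.filter (fun p =>
      !(present.contains p.1) &&
        (match p.2 with
         | none => true
         | some triggers => scenarios.any (fun sc => triggers.contains sc)))).map Prod.fst

-- ===== PRECONDITION & SPEC =====
def Spec_missing_safeguards_py (scenarios : List String) (present : List String) (out : List String) : Prop := out = missing_safeguards_py_alt scenarios present
instance (scenarios : List String) (present : List String) (out : List String) : Decidable (Spec_missing_safeguards_py scenarios present out) := by unfold Spec_missing_safeguards_py; infer_instance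

-- ===== CLAIM (what is proved, stated in full; the proofs are below) =====
def Claim_equal_missing_safeguards_py : Prop := ∀ (scenarios : List String) (present : List String), Dom_missing_safeguards_py scenarios present → Spec_missing_safeguards_py scenarios present (missing_safeguards_py scenarios present)

-- ===== LEMMAS AND PROOFS =====

-- canonical description of A's required set
def pvCanon (scenarios : List String) (s : String) : Prop :=
  s = "telemetry" ∨
    s = "test_coverage" ∨
      ("self_service_reset" ∈ scenarios ∨ "mfa_recovery" ∈ scenarios) ∧
          (s = "token_expiry" ∨
            s = "one_time_use" ∨ s = "enumeration_resistance" ∨ s = "rate_limiting" ∨ s = "abuse_prevention") ∨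
        "account_lockout" ∈ scenarios ∧
            (s = "enumeration_resistance" ∨ s = "rate_limiting" ∨ s = "abuse_prevention" ∨ s = "telemetry") ∨
          ("support_assisted_recovery" ∈ scenarios ∨ "compromised_account" ∈ scenarios) ∧
              (s = "support_verification" ∨ s = "telemetry" ∨ s = "test_coverage") ∨
            "recovery_audit_logging" ∈ scenarios ∧ s = "telemetry"

theorem pv_inter_ne_nil (xs ts : List String) :
    PySem.Set.inter (PySem.Set.ofList xs) ts ≠ [] ↔ ∃ x ∈ xs, x ∈ ts := by
  rw [Ne, List.eq_nil_iff_forall_not_mem]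
  simp only [PySem.Set.mem_inter, PySem.Set.mem_ofList, not_forall, not_not, not_and]
  tauto

theorem pv_exists_mem_pair (xs : List String) (a b : String) :
    (∃ x ∈ xs, x = a ∨ x = b) ↔ a ∈ xs ∨ b ∈ xs := by
  constructor
  · rintro ⟨x, hx, rfl | rfl⟩
    · exact Or.inl hx
    · exact Or.inr hx
  · rintro (h | h)
    · exact ⟨a, h, Or.inl rfl⟩
    · exact ⟨b, h, Or.inr rfl⟩

theorem pv_exists_mem_triple (xs : List String) (a b c : String) :
    (∃ x ∈ xs, x = a ∨ x = b ∨ x = c) ↔ a ∈ xs ∨ b ∈ xs ∨ c ∈ xs := by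
  constructor
  · rintro ⟨x, hx, rfl | rfl | rfl⟩
    · exact Or.inl hx
    · exact Or.inr (Or.inl hx)
    · exact Or.inr (Or.inr hx)
  · rintro (h | h | h)
    · exact ⟨a, h, Or.inl rfl⟩
    · exact ⟨b, h, Or.inr (Or.inl rfl)⟩
    · exact ⟨c, h, Or.inr (Or.inr rfl)⟩

theorem pv_mem_ite_update (c : Prop) [Decidable c] (r : PySem.Set String) (L : List String) (s : String) :
    (s ∈ (if c then PySem.Set.update r L else r)) ↔ (s ∈ r ∨ (c ∧ s ∈ L)) := by
  split_ifs with h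
  · simp [PySem.Set.mem_update, h]
  · simp [h]

theorem pv_mem_ite_add (c : Prop) [Decidable c] (r : PySem.Set String) (x s : String) :
    (s ∈ (if c then PySem.Set.add r x else r)) ↔ (s ∈ r ∨ (c ∧ s = x)) := by
  split_ifs with h
  · simp [PySem.Set.mem_add, h]
  · simp [h]

-- A's required set realizes the canonical description
theorem pv_memA (scenarios : List String) (s : String) :
    s ∈ pvRequiredA (PySem.Set.ofList scenarios) ↔ pvCanon scenarios s := by
  unfold pvRequiredA pvCanon
  rw [pv_mem_ite_add, pv_mem_ite_update, pv_mem_ite_update, pv_mem_ite_update]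
  simp only [pv_inter_ne_nil, PySem.Set.contains_iff, PySem.Set.mem_ofList,
    List.mem_cons, List.not_mem_nil, or_false, pv_exists_mem_pair, or_assoc]

-- A's membership test at each concrete safeguard, as the trigger test B performs
theorem pv_reqA_trigger (scenarios : List String) (s : String) (triggers : List String)
    (h : pvCanon scenarios s ↔ ∃ sc ∈ scenarios, sc ∈ triggers) :
    PySem.Set.contains (pvRequiredA (PySem.Set.ofList scenarios)) s =
      scenarios.any (fun sc => triggers.contains sc) := by
  rw [Bool.eq_iff_iff]
  simp only [PySem.Set.contains_iff, pv_memA, h, List.any_eq_true, List.contains_eq_mem,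
    decide_eq_true_eq]

theorem pv_reqA_always (scenarios : List String) (s : String) (h : pvCanon scenarios s) :
    PySem.Set.contains (pvRequiredA (PySem.Set.ofList scenarios)) s = true := by
  simp only [PySem.Set.contains_iff, pv_memA, h]

-- ===== VERDICT (by name: the statement is the Claim_ definition above) =====
theorem missing_safeguards_py_spec : Claim_equal_missing_safeguards_py := by
  intro scenarios present _
  unfold Spec_missing_safeguards_py missing_safeguards_py missing_safeguards_py_alt
  simp only [pvSafeguardOrder, pvTriggeringScenarios, List.filter_cons, List.filter_nil,
    apply_ite (List.map (Prod.fst : String × Option (List String) → String)),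
    List.map_cons, List.map_nil,
    pv_reqA_always scenarios "telemetry" (by unfold pvCanon; tauto),
    pv_reqA_always scenarios "test_coverage" (by unfold pvCanon; tauto),
    pv_reqA_trigger scenarios "token_expiry" ["self_service_reset", "mfa_recovery"]
      (by unfold pvCanon; simp [pv_exists_mem_pair]),
    pv_reqA_trigger scenarios "one_time_use" ["self_service_reset", "mfa_recovery"]
      (by unfold pvCanon; simp [pv_exists_mem_pair]),
    pv_reqA_trigger scenarios "enumeration_resistance" ["self_service_reset", "mfa_recovery", "account_lockout"]
      (by unfold pvCanon; simp; rw [pv_exists_mem_triple]; tauto),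
    pv_reqA_trigger scenarios "rate_limiting" ["self_service_reset", "mfa_recovery", "account_lockout"]
      (by unfold pvCanon; simp; rw [pv_exists_mem_triple]; tauto),
    pv_reqA_trigger scenarios "abuse_prevention" ["self_service_reset", "mfa_recovery", "account_lockout"]
      (by unfold pvCanon; simp; rw [pv_exists_mem_triple]; tauto),
    pv_reqA_trigger scenarios "support_verification" ["support_assisted_recovery", "compromised_account"]
      (by unfold pvCanon; simp [pv_exists_mem_pair]),
    Bool.true_and, Bool.and_comm]
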